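-- pv_equiv track=rewrite | github.com/goatchurchprime/HGnotebooks | wingflattening/freecad_macro_work/p7modules/p7wingflatten_barmeshfuncs.py | subloopsequence
-- ===== SOURCE A (Python) =====
-- def subloopsequence(polynodesloop, polynodesset):
--     polynodesseqs = [ [ ] ]
--     for i in range(len(polynodesloop)):
--         if polynodesloop[i] in polynodesset:
--             polynodesseqs[-1].append(polynodesloop[i])
--         elif polynodesseqs[-1]:
--             polynodesseqs.append([])
--     if polynodesseqs[-1]:
--         if polynodesseqs[0][0] == polynodesloop[0] and polynodesseqs[-1][-1] == polynodesloop[-1]: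
--             if len(polynodesseqs) == 1:
--                 polynodesseqs[0].append(polynodesseqs[0][0])
--             else:
--                 polynodesseqs[0] = polynodesseqs.pop() + polynodesseqs[0]
--     else:
--         polynodesseqs.pop()
--     return polynodesseqs
-- ===== SOURCE B (Python) =====
-- def _runs(seq, nodeset):
--     # maximal runs of in-set nodes, recursively: skip non-members, slice one run, recurse
--     i = 0
--     while i < len(seq) and seq[i] not in nodeset:
--         i += 1
--     if i == len(seq):
--         return []
--     j = i
--     while j < len(seq) and seq[j] in nodeset:
--         j += 1
--     return [seq[i:j]] + _runs(seq[j:], nodeset)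
--
--
-- def subloopsequence(polynodesloop, polynodesset):
--     # Rotate the loop to start at a non-member node, so no run can wrap around;
--     # split into runs, then move the last run to the front to restore A's order.
--     if not any(x in polynodesset for x in polynodesloop):
--         return []
--     if all(x in polynodesset for x in polynodesloop):
--         return [polynodesloop + [polynodesloop[0]]]
--     k = next(i for i, x in enumerate(polynodesloop) if x not in polynodesset)
--     rot = polynodesloop[k:] + polynodesloop[:k]
--     runs = _runs(rot, polynodesset)
--     if k:
--         runs = runs[-1:] + runs[:-1]
--     return runs
-- ===== Notes on version B (the rewrite author's own statement) =====
-- stated objective: alternative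
-- what changed: A walks the loop once growing a list-of-lists and afterwards patches the wraparound by endpoint-value checks and a conditional first/last merge; B eliminates the wraparound case entirely: it rotates the loop to start at its first non-member node, splits the rotated list into runs (no run can wrap), and restores A's ordering by moving the last run to the front when a rotation happened.
import Mathlib
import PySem

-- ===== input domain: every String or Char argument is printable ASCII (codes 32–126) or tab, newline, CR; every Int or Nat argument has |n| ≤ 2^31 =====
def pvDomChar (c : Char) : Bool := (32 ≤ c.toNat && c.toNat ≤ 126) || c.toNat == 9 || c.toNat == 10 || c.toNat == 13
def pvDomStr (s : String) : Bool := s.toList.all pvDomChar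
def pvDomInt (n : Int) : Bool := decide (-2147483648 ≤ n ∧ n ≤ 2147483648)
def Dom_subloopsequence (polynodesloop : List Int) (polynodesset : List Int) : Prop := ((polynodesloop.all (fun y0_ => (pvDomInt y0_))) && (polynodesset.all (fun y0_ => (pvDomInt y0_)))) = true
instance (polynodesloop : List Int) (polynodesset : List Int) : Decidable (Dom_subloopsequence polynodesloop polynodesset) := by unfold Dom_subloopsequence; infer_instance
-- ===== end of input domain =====

-- B avoids A's wraparound endpoint checks and first/last merge altogether: it rotates
-- the loop to start at its first non-member node, splits into runs (none can wrap),
-- and moves the last run to the front when a rotation happened; objective: alternative.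

-- ===== PORT A =====
-- loop body of A: append to the last sequence, or close a nonempty last sequence
def stepA (polynodesset : List Int) (s : List (List Int)) (x : Int) : List (List Int) :=
  if polynodesset.contains x then s.dropLast ++ [s.getLastD [] ++ [x]]
  else if s.getLastD [] ≠ [] then s ++ [[]] else s

def subloopsequence (polynodesloop : List Int) (polynodesset : List Int) : List (List Int) :=
  let seqs := polynodesloop.foldl (stepA polynodesset) [[]]
  if seqs.getLastD [] ≠ [] then
    if (seqs.headD []).headD 0 = polynodesloop.headD 0 ∧
       (seqs.getLastD []).getLastD 0 = polynodesloop.getLastD 0 then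
      if seqs.length = 1 then [seqs.headD [] ++ [(seqs.headD []).headD 0]]
      else (seqs.getLastD [] ++ seqs.headD []) :: (seqs.drop 1).dropLast
    else seqs
  else seqs.dropLast

-- ===== PORT B =====
-- _runs of Source B: skip non-members one index at a time (the first while loop), then
-- slice out one maximal in-set run (second while loop, seq[i:j]) and recurse on seq[j:]
def pyRuns (nodeset : List Int) : List Int → List (List Int)
  | [] => []
  | x :: xs =>
    if nodeset.contains x then
      (x :: xs.takeWhile (fun y => nodeset.contains y)) ::
        pyRuns nodeset (xs.dropWhile (fun y => nodeset.contains y))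
    else pyRuns nodeset xs
termination_by l => l.length
decreasing_by
  · exact Nat.lt_succ_of_le (xs.length_dropWhile_le _)
  · simp

def subloopsequence_alt (polynodesloop : List Int) (polynodesset : List Int) : List (List Int) :=
  if ¬ polynodesloop.any (fun x => polynodesset.contains x) then []
  else if polynodesloop.all (fun x => polynodesset.contains x) then
    [polynodesloop ++ [polynodesloop.headD 0]]
  else
    -- k = next(i for i, x in enumerate(loop) if x not in set) = length of the member prefix
    let k := (polynodesloop.takeWhile (fun x => polynodesset.contains x)).length
    let rot := polynodesloop.drop k ++ polynodesloop.take k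
    let runs := pyRuns polynodesset rot
    if k ≠ 0 then
      -- runs[-1:] + runs[:-1]  (exact: a nonnegative-index rendering of these slices)
      runs.drop (runs.length - 1) ++ runs.dropLast
    else runs

-- ===== PRECONDITION & SPEC =====
def Spec_subloopsequence (polynodesloop : List Int) (polynodesset : List Int) (out : List (List Int)) : Prop := out = subloopsequence_alt polynodesloop polynodesset
instance (polynodesloop : List Int) (polynodesset : List Int) (out : List (List Int)) : Decidable (Spec_subloopsequence polynodesloop polynodesset out) := by unfold Spec_subloopsequence; infer_instance

-- ===== CLAIM (what is proved, stated in full; the proofs are below) =====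
def Claim_equal_subloopsequence : Prop := ∀ (polynodesloop : List Int) (polynodesset : List Int), Dom_subloopsequence polynodesloop polynodesset → Spec_subloopsequence polynodesloop polynodesset (subloopsequence polynodesloop polynodesset)

-- ===== LEMMAS AND PROOFS =====

-- A's fold, reformulated on just the open (last) sequence
def mergeRuns (polynodesset : List Int) : List Int → List Int → List (List Int)
  | cur, [] => [cur]
  | cur, x :: xs =>
    if polynodesset.contains x then mergeRuns polynodesset (cur ++ [x]) xs
    else if cur ≠ [] then cur :: mergeRuns polynodesset [] xs
    else mergeRuns polynodesset [] xs

-- does the loop end with an in-set node?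
def endsIn (polynodesset : List Int) (l : List Int) : Bool :=
  match l.getLast? with
  | none => false
  | some x => polynodesset.contains x

theorem foldl_stepA (pset : List Int) :
    ∀ (l : List Int) (done : List (List Int)) (cur : List Int),
      l.foldl (stepA pset) (done ++ [cur]) = done ++ mergeRuns pset cur l := by
  intro l
  induction l with
  | nil => intro done cur; simp [mergeRuns]
  | cons x xs ih =>
    intro done cur
    rw [List.foldl_cons]
    by_cases hx : x ∈ pset
    · rw [show stepA pset (done ++ [cur]) x = done ++ [cur ++ [x]] by
        simp [stepA, hx], ih]
      simp [mergeRuns, hx]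
    · by_cases hc : cur = []
      · subst hc
        rw [show stepA pset (done ++ [[]]) x = done ++ [[]] by simp [stepA, hx], ih]
        simp [mergeRuns, hx]
      · rw [show stepA pset (done ++ [cur]) x = (done ++ [cur]) ++ [[]] by
          simp [stepA, hx, hc], ih]
        simp [mergeRuns, hx, hc]

theorem mergeRuns_ne_nil (pset : List Int) :
    ∀ (xs cur : List Int), cur ≠ [] →
      mergeRuns pset cur xs =
        if xs.dropWhile (fun y => pset.contains y) = [] then [cur ++ xs]
        else (cur ++ xs.takeWhile (fun y => pset.contains y)) ::
               mergeRuns pset [] (xs.dropWhile (fun y => pset.contains y)) := by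
  intro xs
  induction xs with
  | nil => intro cur hc; simp [mergeRuns]
  | cons x xs ih =>
    intro cur hc
    by_cases hx : pset.contains x = true
    · rw [mergeRuns, if_pos hx, ih _ (by simp)]
      rw [List.dropWhile_cons_of_pos hx, List.takeWhile_cons_of_pos hx]
      split
      · simp only [List.append_assoc, List.singleton_append]
      · simp only [List.append_assoc, List.singleton_append]
    · rw [mergeRuns, if_neg hx, if_pos hc]
      rw [List.dropWhile_cons_of_neg hx, List.takeWhile_cons_of_neg hx,
        if_neg (by simp [List.dropWhile_eq_nil_iff] at *)]
      rw [show mergeRuns pset [] (x :: xs) = mergeRuns pset [] xs by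
        rw [mergeRuns, if_neg hx]; simp]
      simp

theorem endsIn_cons_cons (pset : List Int) (a b : Int) (l : List Int) :
    endsIn pset (a :: b :: l) = endsIn pset (b :: l) := by
  simp [endsIn, List.getLast?_cons_cons]

theorem endsIn_congr (pset : List Int) {l₁ l₂ : List Int}
    (h : l₁.getLast? = l₂.getLast?) : endsIn pset l₁ = endsIn pset l₂ := by
  simp [endsIn, h]

theorem getLast?_cons_of_ne_nil {x : Int} {xs : List Int} (h : xs ≠ []) :
    (x :: xs).getLast? = xs.getLast? := by
  cases xs with
  | nil => exact absurd rfl h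
  | cons y ys => exact List.getLast?_cons_cons

theorem getLast?_of_suffix {l₁ l₂ : List Int} (h : l₁ <:+ l₂) (hne : l₁ ≠ []) :
    l₂.getLast? = l₁.getLast? := by
  obtain ⟨t, rfl⟩ := h
  cases l₁ with
  | nil => exact absurd rfl hne
  | cons y ys =>
    have h2 : (y :: ys).getLast? = some ((y :: ys).getLast (by simp)) :=
      List.getLast?_eq_some_getLast _
    simp [List.getLast?_append, h2]

theorem endsIn_cons_all (pset : List Int) :
    ∀ (x : Int) (xs : List Int), pset.contains x = true →
      (∀ y ∈ xs, pset.contains y = true) → endsIn pset (x :: xs) = true := by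
  intro x xs
  induction xs generalizing x with
  | nil => intro hx _; simpa [endsIn] using hx
  | cons y ys ih =>
    intro _ h
    rw [endsIn_cons_cons]
    exact ih y (h y (by simp)) (fun z hz => h z (by simp [hz]))

theorem pyRuns_mem {pset : List Int} :
    ∀ {xs : List Int} {g : List Int}, g ∈ pyRuns pset xs →
      g ≠ [] ∧ ∀ y ∈ g, pset.contains y = true := by
  intro xs
  induction xs using pyRuns.induct pset with
  | case1 => intro g hg; simp [pyRuns] at hg
  | case2 x xs hx ih =>
    intro g hg
    rw [pyRuns, if_pos hx] at hg
    rcases List.mem_cons.mp hg with h | h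
    · subst h
      refine ⟨by simp, ?_⟩
      intro y hy
      rcases List.mem_cons.mp hy with h | h
      · subst h; exact hx
      · exact List.mem_takeWhile_imp h
    · exact ih h
  | case3 x xs hx ih =>
    intro g hg
    rw [pyRuns, if_neg hx] at hg
    exact ih hg

theorem getLastD_eq_getLast_cons {α : Type} (a : α) (l : List α) (d : α) :
    (a :: l).getLastD d = (a :: l).getLast (by simp) := by
  rw [List.getLastD_eq_getLast?, List.getLast?_eq_some_getLast (by simp)]
  rfl

theorem getLastD_mem_cons {α : Type} (a : α) (l : List α) (d : α) :
    (a :: l).getLastD d ∈ a :: l := by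
  rw [getLastD_eq_getLast_cons]
  exact List.getLast_mem _

theorem pyRuns_endsIn {pset : List Int} :
    ∀ {xs : List Int}, endsIn pset xs = true →
      pyRuns pset xs ≠ [] ∧ ((pyRuns pset xs).getLastD []).getLast? = xs.getLast? := by
  intro xs
  induction xs using pyRuns.induct pset with
  | case1 => intro h; simp [endsIn] at h
  | case2 x xs hx ih =>
    intro he
    rw [pyRuns, if_pos hx]
    by_cases hd : xs.dropWhile (fun y => pset.contains y) = []
    · have hall : ∀ y ∈ xs, pset.contains y = true := by
        simpa [List.dropWhile_eq_nil_iff] using hd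
      rw [List.takeWhile_eq_self_iff.mpr hall]
      have : pyRuns pset (xs.dropWhile (fun y => pset.contains y)) = [] := by
        rw [hd]; simp [pyRuns]
      rw [this]
      exact ⟨by simp, rfl⟩
    · have hgl : (x :: xs).getLast? =
          (xs.dropWhile (fun y => pset.contains y)).getLast? := by
        rw [getLast?_cons_of_ne_nil (by intro h; exact hd (by simp [h]))]
        exact getLast?_of_suffix (List.dropWhile_suffix _) hd
      have he' : endsIn pset (xs.dropWhile (fun y => pset.contains y)) = true := by
        rw [← endsIn_congr pset hgl]; exact he
      obtain ⟨h1, h2⟩ := ih he'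
      refine ⟨by simp, ?_⟩
      rw [List.getLastD_cons]
      cases hrr : pyRuns pset (xs.dropWhile (fun y => pset.contains y)) with
      | nil => exact absurd hrr h1
      | cons r rs =>
        rw [hrr] at h2
        rw [show (r :: rs).getLastD (x :: xs.takeWhile (fun y => pset.contains y)) =
            (r :: rs).getLastD [] by rw [getLastD_eq_getLast_cons, getLastD_eq_getLast_cons]]
        rw [h2, hgl]
  | case3 x xs hx ih =>
    intro he
    have hxs : xs ≠ [] := by
      intro h; subst h
      simp only [endsIn, List.getLast?_singleton] at he
      exact hx he
    rw [pyRuns, if_neg hx]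
    have he' : endsIn pset xs = true :=
      ((endsIn_congr pset (getLast?_cons_of_ne_nil hxs)).symm.trans he)
    obtain ⟨h1, h2⟩ := ih he'
    exact ⟨h1, by rw [h2, getLast?_cons_of_ne_nil hxs]⟩

theorem mergeRuns_nil_eq (pset : List Int) (xs : List Int) :
    mergeRuns pset [] xs = pyRuns pset xs ++ (if endsIn pset xs then [] else [[]]) := by
  induction xs using pyRuns.induct pset with
  | case1 => simp [mergeRuns, pyRuns, endsIn]
  | case2 x xs hx ih =>
    rw [show mergeRuns pset [] (x :: xs) = mergeRuns pset [x] xs by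
      rw [mergeRuns, if_pos hx]; rfl]
    rw [mergeRuns_ne_nil pset xs [x] (by simp)]
    rw [pyRuns, if_pos hx]
    by_cases hd : xs.dropWhile (fun y => pset.contains y) = []
    · rw [if_pos hd, hd]
      have hall : ∀ y ∈ xs, pset.contains y = true := by
        simpa [List.dropWhile_eq_nil_iff] using hd
      rw [List.takeWhile_eq_self_iff.mpr hall]
      rw [endsIn_cons_all pset x xs hx hall]
      simp [pyRuns]
    · rw [if_neg hd, ih]
      have he : endsIn pset (x :: xs) =
          endsIn pset (xs.dropWhile (fun y => pset.contains y)) := by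
        apply endsIn_congr
        rw [getLast?_cons_of_ne_nil (by
          intro h; exact hd (by simp [h]))]
        exact getLast?_of_suffix (List.dropWhile_suffix _) hd
      rw [he]
      simp
  | case3 x xs hx ih =>
    rw [show mergeRuns pset [] (x :: xs) = mergeRuns pset [] xs by
      rw [mergeRuns, if_neg hx]; simp]
    rw [ih, pyRuns, if_neg hx]
    cases xs with
    | nil =>
      have hx' : x ∉ pset := by simpa using hx
      simp [endsIn, hx', pyRuns]
    | cons y ys => rw [endsIn_cons_cons]

-- no member ⇒ no runs
theorem pyRuns_eq_nil (pset : List Int) :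
    ∀ (l : List Int), (∀ x ∈ l, pset.contains x = false) → pyRuns pset l = [] := by
  intro l
  induction l with
  | nil => intro _; simp [pyRuns]
  | cons x xs ih =>
    intro h
    rw [pyRuns, if_neg (by simpa using h x (by simp))]
    exact ih (fun y hy => h y (by simp [hy]))

theorem endsIn_false_of_no_mem (pset : List Int) (l : List Int)
    (h : ∀ x ∈ l, pset.contains x = false) : endsIn pset l = false := by
  cases hl : l.getLast? with
  | none => simp [endsIn, hl]
  | some x =>
    have hx : x ∈ l := List.mem_of_getLast? hl
    simp only [endsIn, hl]
    exact h x hx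

-- an all-member prefix followed by a list starting outside the set forms exactly one run
theorem pyRuns_prefix (pset : List Int) (p s : List Int) (hp : p ≠ [])
    (hall : ∀ x ∈ p, pset.contains x = true)
    (hs : s.takeWhile (fun y => pset.contains y) = []) :
    pyRuns pset (p ++ s) = p :: pyRuns pset s := by
  cases p with
  | nil => exact absurd rfl hp
  | cons x p' =>
    have hx : pset.contains x = true := hall x (by simp)
    have hall' : ∀ y ∈ p', pset.contains y = true := fun y hy => hall y (by simp [hy])
    have hlen : (p'.takeWhile (fun y => pset.contains y)).length = p'.length := by
      rw [List.takeWhile_eq_self_iff.mpr hall']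
    have hds : s.dropWhile (fun y => pset.contains y) = s := by
      have h2 := List.takeWhile_append_dropWhile (p := fun y => pset.contains y) (l := s)
      rwa [hs, List.nil_append] at h2
    have hdp : p'.dropWhile (fun y => pset.contains y) = [] :=
      List.dropWhile_eq_nil_iff.mpr hall'
    rw [List.cons_append, pyRuns, if_pos hx]
    rw [List.takeWhile_append, if_pos hlen, hs, List.append_nil]
    rw [List.dropWhile_append, hdp]
    simp only [List.isEmpty_nil, if_true]
    rw [hds]

-- all members ⇒ a single run
theorem pyRuns_all (pset : List Int) (l : List Int) (hl : l ≠ [])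
    (hall : ∀ x ∈ l, pset.contains x = true) : pyRuns pset l = [l] := by
  have h := pyRuns_prefix pset l [] hl hall (by simp)
  simpa [pyRuns] using h

theorem getLastD_default_irrel {α : Type} {l : List α} (h : l ≠ []) (d₁ d₂ : α) :
    l.getLastD d₁ = l.getLastD d₂ := by
  cases l with
  | nil => exact absurd rfl h
  | cons a t => rw [getLastD_eq_getLast_cons, getLastD_eq_getLast_cons]

theorem dropWhile_head_false {α : Type} (f : α → Bool) :
    ∀ (l : List α) {y : α} {ys : List α}, l.dropWhile f = y :: ys → f y = false := by
  intro l
  induction l with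
  | nil => intro y ys h; simp at h
  | cons a t ih =>
    intro y ys h
    by_cases ha : f a = true
    · rw [List.dropWhile_cons_of_pos ha] at h
      exact ih h
    · rw [List.dropWhile_cons_of_neg ha] at h
      obtain ⟨rfl, rfl⟩ := List.cons_eq_cons.mp h
      exact Bool.eq_false_iff.mpr ha

theorem getLastD_congr_getLast? {α : Type} {l₁ l₂ : List α}
    (h : l₁.getLast? = l₂.getLast?) (d : α) : l₁.getLastD d = l₂.getLastD d := by
  rw [List.getLastD_eq_getLast?, List.getLastD_eq_getLast?, h]

theorem getLastD_concat' {α : Type} (l : List α) (a d : α) :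
    (l ++ [a]).getLastD d = a := by
  rw [List.getLastD_eq_getLast?, List.getLast?_concat]
  rfl

theorem headD_append_of_ne_nil {α : Type} {p : List α} (s : List α) (h : p ≠ []) (d : α) :
    (p ++ s).headD d = p.headD d := by
  cases p with
  | nil => exact absurd rfl h
  | cons a t => rfl

theorem take_len_takeWhile {α : Type} (p : α → Bool) (l : List α) :
    l.take (l.takeWhile p).length = l.takeWhile p := by
  have h := List.take_left (l₁ := l.takeWhile p) (l₂ := l.dropWhile p)
  rwa [List.takeWhile_append_dropWhile] at h

theorem drop_len_takeWhile {α : Type} (p : α → Bool) (l : List α) :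
    l.drop (l.takeWhile p).length = l.dropWhile p := by
  have h := List.drop_left (l₁ := l.takeWhile p) (l₂ := l.dropWhile p)
  rwa [List.takeWhile_append_dropWhile] at h

-- B's line `runs[-1:] + runs[:-1]` on a list ending in a known last element
theorem bLast (l : List (List Int)) (a : List Int) :
    (l ++ [a]).drop ((l ++ [a]).length - 1) ++ (l ++ [a]).dropLast = a :: l := by
  have h1 : (l ++ [a]).length - 1 = l.length := by simp
  rw [h1, List.drop_left, List.dropLast_concat]
  rfl

-- appending an all-member tail: it is absorbed into the last run, or forms a new one
theorem pyRuns_absorb (pset : List Int) (p : List Int) (hp : p ≠ [])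
    (hall : ∀ x ∈ p, pset.contains x = true) :
    ∀ s : List Int, pyRuns pset (s ++ p) =
      if endsIn pset s = true then
        (pyRuns pset s).dropLast ++ [(pyRuns pset s).getLastD [] ++ p]
      else pyRuns pset s ++ [p] := by
  intro s
  induction s using pyRuns.induct pset with
  | case1 =>
    rw [List.nil_append, pyRuns_all pset p hp hall]
    simp [endsIn, pyRuns]
  | case2 x xs hx ih =>
    by_cases hd : xs.dropWhile (fun y => pset.contains y) = []
    · have hallxs : ∀ y ∈ xs, pset.contains y = true := by
        simpa [List.dropWhile_eq_nil_iff] using hd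
      have hE : endsIn pset (x :: xs) = true := endsIn_cons_all pset x xs hx hallxs
      rw [hE, if_pos rfl]
      rw [pyRuns_all pset ((x :: xs) ++ p) (by simp) (by
            intro y hy
            rcases List.mem_append.mp hy with h | h
            · rcases List.mem_cons.mp h with h | h
              · exact h ▸ hx
              · exact hallxs y h
            · exact hall y h),
          pyRuns_all pset (x :: xs) (by simp) (by
            intro y hy
            rcases List.mem_cons.mp hy with h | h
            · exact h ▸ hx
            · exact hallxs y h)]
      simp
    · have hgl2 : (x :: xs).getLast? = (xs.dropWhile (fun y => pset.contains y)).getLast? := by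
        rw [getLast?_cons_of_ne_nil (by intro h; exact hd (by simp [h]))]
        exact getLast?_of_suffix (List.dropWhile_suffix _) hd
      have hE : endsIn pset (x :: xs) = endsIn pset (xs.dropWhile (fun y => pset.contains y)) :=
        endsIn_congr pset hgl2
      have htw : (xs ++ p).takeWhile (fun y => pset.contains y) =
          xs.takeWhile (fun y => pset.contains y) := by
        rw [List.takeWhile_append, if_neg]
        intro hlen
        have heq : xs.takeWhile (fun y => pset.contains y) = xs :=
          (List.takeWhile_prefix _).eq_of_length hlen
        exact hd (List.dropWhile_eq_nil_iff.mpr (List.takeWhile_eq_self_iff.mp heq))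
      have hdwapp : (xs ++ p).dropWhile (fun y => pset.contains y) =
          xs.dropWhile (fun y => pset.contains y) ++ p := by
        rw [List.dropWhile_append, if_neg (by simpa [List.isEmpty_iff] using hd)]
      rw [List.cons_append, pyRuns, if_pos hx, htw, hdwapp, ih]
      rw [show pyRuns pset (x :: xs) = (x :: xs.takeWhile (fun y => pset.contains y)) ::
            pyRuns pset (xs.dropWhile (fun y => pset.contains y)) by rw [pyRuns, if_pos hx]]
      rw [← hE]
      by_cases hEE : endsIn pset (x :: xs) = true
      · rw [hEE]
        have hne : pyRuns pset (xs.dropWhile (fun y => pset.contains y)) ≠ [] :=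
          (pyRuns_endsIn (by rw [← hE]; exact hEE)).1
        cases hr : pyRuns pset (xs.dropWhile (fun y => pset.contains y)) with
        | nil => exact absurd hr hne
        | cons r rs => simp
      · simp only [if_neg hEE]
        simp
  | case3 x xs hx ih =>
    rw [List.cons_append, pyRuns, if_neg hx, ih]
    rw [show pyRuns pset (x :: xs) = pyRuns pset xs by rw [pyRuns, if_neg hx]]
    cases xs with
    | nil =>
      have h1 : endsIn pset [x] = false := by
        simp only [endsIn, List.getLast?_singleton]
        exact Bool.eq_false_iff.mpr hx
      rw [h1]
      simp [endsIn]
    | cons y ys => rw [endsIn_cons_cons]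

-- ===== VERDICT (by name: the statement is the Claim_ definition above) =====
theorem subloopsequence_spec : Claim_equal_subloopsequence := by
  unfold Claim_equal_subloopsequence
  intro loop pset _
  unfold Spec_subloopsequence
  have hfold : loop.foldl (stepA pset) [[]] = mergeRuns pset [] loop := by
    simpa using foldl_stepA pset loop [] []
  by_cases hany : loop.any (fun x => pset.contains x) = true
  · by_cases hall : loop.all (fun x => pset.contains x) = true
    · -- all nodes are members
      have hl : loop ≠ [] := by rintro rfl; simp at hany
      have hallm : ∀ x ∈ loop, pset.contains x = true := by
        intro x hx; exact List.all_eq_true.mp hall x hx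
      have hE : endsIn pset loop = true := by
        cases loop with
        | nil => exact absurd rfl hl
        | cons a t =>
          exact endsIn_cons_all pset a t (hallm a (by simp)) (fun y hy => hallm y (by simp [hy]))
      have hA : subloopsequence loop pset = [loop ++ [loop.headD 0]] := by
        unfold subloopsequence
        rw [hfold, mergeRuns_nil_eq, hE, pyRuns_all pset loop hl hallm]
        cases loop with
        | nil => exact absurd rfl hl
        | cons a t => simp
      have hB : subloopsequence_alt loop pset = [loop ++ [loop.headD 0]] := by
        simp only [subloopsequence_alt]
        rw [if_neg (not_not_intro hany), if_pos hall]
      rw [hA, hB]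
    · -- mixed: both members and non-members occur
      have hPS : loop.takeWhile (fun x => pset.contains x) ++
          loop.dropWhile (fun x => pset.contains x) = loop :=
        List.takeWhile_append_dropWhile
      have hallP : ∀ x ∈ loop.takeWhile (fun x => pset.contains x), pset.contains x = true :=
        fun x hx => List.mem_takeWhile_imp hx
      have hS_ne : loop.dropWhile (fun x => pset.contains x) ≠ [] := by
        intro h
        exact hall (List.all_eq_true.mpr (List.dropWhile_eq_nil_iff.mp h))
      obtain ⟨y, ys, hSe, hy⟩ : ∃ y ys,
          loop.dropWhile (fun x => pset.contains x) = y :: ys ∧ pset.contains y = false := by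
        cases hSe : loop.dropWhile (fun x => pset.contains x) with
        | nil => exact absurd hSe hS_ne
        | cons y ys => exact ⟨y, ys, rfl, dropWhile_head_false _ loop hSe⟩
      have htwS : (loop.dropWhile (fun x => pset.contains x)).takeWhile
          (fun x => pset.contains x) = [] := by
        rw [hSe]
        exact List.takeWhile_cons_of_neg (by
          intro hc
          rw [hy] at hc
          exact Bool.false_ne_true hc)
      have hgl : loop.getLast? = (loop.dropWhile (fun x => pset.contains x)).getLast? :=
        getLast?_of_suffix ⟨_, hPS⟩ hS_ne
      have hEls : endsIn pset loop = endsIn pset (loop.dropWhile (fun x => pset.contains x)) :=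
        endsIn_congr pset hgl
      by_cases hP : loop.takeWhile (fun x => pset.contains x) = []
      · -- the loop starts at a non-member node: no rotation, no wraparound in A either
        have hloopS : loop = y :: ys := by
          conv_lhs => rw [← hPS]
          rw [hP, List.nil_append, hSe]
        have hB : subloopsequence_alt loop pset = pyRuns pset loop := by
          simp only [subloopsequence_alt]
          rw [if_neg (not_not_intro hany), if_neg hall, hP]
          simp
        by_cases hE : endsIn pset loop = true
        · obtain ⟨hne, -⟩ := pyRuns_endsIn (pset := pset) (xs := loop) hE
          have hA : subloopsequence loop pset = pyRuns pset loop := by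
            unfold subloopsequence
            rw [hfold, mergeRuns_nil_eq, hE, if_pos rfl, List.append_nil]
            cases hgs : pyRuns pset loop with
            | nil => exact absurd hgs hne
            | cons g t =>
              have hg := pyRuns_mem (pset := pset) (xs := loop) (g := g) (by rw [hgs]; simp)
              have hglast := pyRuns_mem (pset := pset) (xs := loop) (g := (g :: t).getLastD [])
                (by rw [hgs]; exact getLastD_mem_cons _ _ _)
              rw [if_pos hglast.1]
              have hcond : ¬(((g :: t).headD []).headD 0 = loop.headD 0 ∧
                  ((g :: t).getLastD []).getLastD 0 = loop.getLastD 0) := by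
                rintro ⟨h1, -⟩
                have hgm : pset.contains (g.headD 0) = true := by
                  cases g with
                  | nil => exact absurd rfl hg.1
                  | cons b u => exact hg.2 _ (by simp)
                rw [List.headD_cons] at h1
                rw [h1, hloopS, List.headD_cons, hy] at hgm
                exact absurd hgm (by simp)
              rw [if_neg hcond]
          rw [hA, hB]
        · have hEf : endsIn pset loop = false := Bool.eq_false_iff.mpr hE
          have hA : subloopsequence loop pset = pyRuns pset loop := by
            unfold subloopsequence
            rw [hfold, mergeRuns_nil_eq, hEf, if_neg Bool.false_ne_true,
              if_neg (not_not_intro (getLastD_concat' _ _ _)), List.dropLast_concat]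
          rw [hA, hB]
      · -- the loop starts inside a run: rotate; A merges first and last
        have hkne : (loop.takeWhile (fun x => pset.contains x)).length ≠ 0 := by
          simpa [List.length_eq_zero_iff] using hP
        have habs := pyRuns_absorb pset (loop.takeWhile (fun x => pset.contains x)) hP hallP
          (loop.dropWhile (fun x => pset.contains x))
        have hpre := pyRuns_prefix pset (loop.takeWhile (fun x => pset.contains x))
          (loop.dropWhile (fun x => pset.contains x)) hP hallP htwS
        rw [hPS] at hpre
        have hBrot : loop.drop (loop.takeWhile (fun x => pset.contains x)).length ++
            loop.take (loop.takeWhile (fun x => pset.contains x)).length =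
            loop.dropWhile (fun x => pset.contains x) ++
              loop.takeWhile (fun x => pset.contains x) := by
          rw [drop_len_takeWhile, take_len_takeWhile]
        by_cases hE : endsIn pset loop = true
        · -- wraparound: the run through the endpoints
          have hES : endsIn pset (loop.dropWhile (fun x => pset.contains x)) = true := by
            rw [← hEls]; exact hE
          obtain ⟨hrs_ne, hrs_last⟩ := pyRuns_endsIn (pset := pset) hES
          have hB : subloopsequence_alt loop pset =
              ((pyRuns pset (loop.dropWhile (fun x => pset.contains x))).getLastD [] ++
                loop.takeWhile (fun x => pset.contains x)) ::
              (pyRuns pset (loop.dropWhile (fun x => pset.contains x))).dropLast := by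
            simp only [subloopsequence_alt]
            rw [if_neg (not_not_intro hany), if_neg hall, if_pos hkne, hBrot, habs,
              if_pos hES, bLast]
          have hA : subloopsequence loop pset =
              ((pyRuns pset (loop.dropWhile (fun x => pset.contains x))).getLastD [] ++
                loop.takeWhile (fun x => pset.contains x)) ::
              (pyRuns pset (loop.dropWhile (fun x => pset.contains x))).dropLast := by
            unfold subloopsequence
            rw [hfold, mergeRuns_nil_eq, hE, if_pos rfl, List.append_nil, hpre]
            cases hr : pyRuns pset (loop.dropWhile (fun x => pset.contains x)) with
            | nil => exact absurd hr hrs_ne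
            | cons r rs' =>
              rw [hr] at hrs_last
              have hlastmem := pyRuns_mem (pset := pset)
                (xs := loop.dropWhile (fun x => pset.contains x))
                (g := (r :: rs').getLastD (loop.takeWhile (fun x => pset.contains x)))
                (by rw [hr]; exact getLastD_mem_cons _ _ _)
              rw [if_pos (by rw [List.getLastD_cons]; exact hlastmem.1)]
              have hcond : (((loop.takeWhile (fun x => pset.contains x)) :: r :: rs').headD
                    []).headD 0 = loop.headD 0 ∧
                  (((loop.takeWhile (fun x => pset.contains x)) :: r :: rs').getLastD
                    []).getLastD 0 = loop.getLastD 0 := by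
                constructor
                · rw [List.headD_cons]
                  conv_rhs => rw [← hPS]
                  rw [headD_append_of_ne_nil _ hP]
                · rw [List.getLastD_cons,
                    getLastD_default_irrel (l := r :: rs') (by simp) _ []]
                  exact getLastD_congr_getLast? (hrs_last.trans hgl.symm) 0
              rw [if_pos hcond, if_neg (by simp)]
              rw [List.getLastD_cons, List.headD_cons,
                getLastD_default_irrel (l := r :: rs') (by simp) _ []]
              simp
          rw [hA, hB]
        · -- no wraparound: A keeps the prefix run first; B rotates it back to the front
          have hEf : endsIn pset loop = false := Bool.eq_false_iff.mpr hE
          have hESf : endsIn pset (loop.dropWhile (fun x => pset.contains x)) = false := by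
            rw [← hEls]; exact hEf
          have hB : subloopsequence_alt loop pset =
              (loop.takeWhile (fun x => pset.contains x)) ::
                pyRuns pset (loop.dropWhile (fun x => pset.contains x)) := by
            simp only [subloopsequence_alt]
            rw [if_neg (not_not_intro hany), if_neg hall, if_pos hkne, hBrot, habs,
              if_neg (show ¬(endsIn pset (loop.dropWhile (fun x => pset.contains x)) = true) by
                intro hc
                rw [hESf] at hc
                exact Bool.false_ne_true hc), bLast]
          have hA : subloopsequence loop pset =
              (loop.takeWhile (fun x => pset.contains x)) ::
                pyRuns pset (loop.dropWhile (fun x => pset.contains x)) := by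
            unfold subloopsequence
            rw [hfold, mergeRuns_nil_eq, hEf, if_neg Bool.false_ne_true, hpre,
              if_neg (not_not_intro (getLastD_concat' _ _ _)), List.dropLast_concat]
          rw [hA, hB]
  · -- no node of the loop is in the set
    have hno : ∀ x ∈ loop, pset.contains x = false := by
      intro x hx
      have hxt : pset.contains x = true ∨ pset.contains x = false := by
        cases pset.contains x <;> simp
      rcases hxt with h | h
      · exact absurd (List.any_eq_true.mpr ⟨x, hx, h⟩) hany
      · exact h
    have hA : subloopsequence loop pset = [] := by
      unfold subloopsequence
      rw [hfold, mergeRuns_nil_eq, pyRuns_eq_nil pset loop hno,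
        endsIn_false_of_no_mem pset loop hno]
      simp
    have hB : subloopsequence_alt loop pset = [] := by
      simp only [subloopsequence_alt]
      rw [if_pos hany]
    rw [hA, hB]
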